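-- pv_equiv track=rewrite | github.com/fdgrock/gaming-ai-bot | streamlit_app/Backup/ai_lottery_bot/enhancements/phase2_cross_game_intelligence.py | _count_consecutive_numbers
-- ===== SOURCE A (Python) =====
-- from typing import Dict, List, Any, Optional, Tuple
--
-- def _count_consecutive_numbers(numbers: List[int]) -> int:
--     """Count consecutive number pairs"""
--     try:
--         sorted_nums = sorted(numbers)
--         consecutive_count = 0
--         for i in range(len(sorted_nums) - 1):
--             if sorted_nums[i+1] - sorted_nums[i] == 1:
--                 consecutive_count += 1
--         return consecutive_count
--     except Exception:
--         return 0
-- ===== SOURCE B (Python) =====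
-- def _count_consecutive_numbers(numbers):
--     """Count consecutive number pairs"""
--     try:
--         s = set(numbers)
--         return sum(1 for v in s if v + 1 in s)
--     except Exception:
--         return 0
-- ===== Notes on version B (the rewrite author's own statement) =====
-- stated objective: alternative
-- what changed: Replaces the sort-then-adjacent-index-scan with a set build and membership count: each boundary between a run of value v and a run of v+1 contributes exactly one adjacent consecutive pair in sorted order, so counting distinct v with v+1 in the set gives the same value.
import Mathlib
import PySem

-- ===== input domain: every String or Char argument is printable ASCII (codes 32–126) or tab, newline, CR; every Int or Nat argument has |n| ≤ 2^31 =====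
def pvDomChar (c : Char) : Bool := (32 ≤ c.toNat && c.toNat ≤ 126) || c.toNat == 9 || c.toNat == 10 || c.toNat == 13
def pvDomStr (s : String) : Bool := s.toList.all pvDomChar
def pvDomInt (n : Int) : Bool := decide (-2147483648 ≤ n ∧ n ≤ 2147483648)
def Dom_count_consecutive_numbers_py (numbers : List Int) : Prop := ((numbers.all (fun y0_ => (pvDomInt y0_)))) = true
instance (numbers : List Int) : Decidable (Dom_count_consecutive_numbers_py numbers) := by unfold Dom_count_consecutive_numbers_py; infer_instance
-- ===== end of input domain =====

-- B replaces A's sort-then-adjacent-index-scan with a set build and a membership count: each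
-- boundary between a run of value v and a run of v+1 contributes exactly one adjacent pair at
-- distance 1 in the sorted list. On List Int neither Python body can raise, so the try/except
-- (which both A and B carry) is dead code and is not modelled.

-- ===== PORT A =====
-- sorted_nums = sorted(numbers); for i in range(len(sorted_nums)-1): if sorted_nums[i+1]-sorted_nums[i]==1: count += 1
def count_consecutive_numbers_py (numbers : List Int) : Int :=
  let sorted_nums := PySem.List.sorted numbers (fun x => x) false
  (PySem.List.pyRange 0 ((sorted_nums.length : Int) - 1) 1).foldl
    (fun consecutive_count i =>
      if PySem.List.pyGetD sorted_nums (i + 1) 0 - PySem.List.pyGetD sorted_nums i 0 = 1 then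
        consecutive_count + 1
      else consecutive_count) 0

-- ===== PORT B =====
-- s = set(numbers); return sum(1 for v in s if v + 1 in s)   (a sum over the set: order-independent)
def count_consecutive_numbers_py_alt (numbers : List Int) : Int :=
  let s : PySem.Set Int := PySem.Set.ofList numbers
  (s.map (fun v => if PySem.Set.contains s (v + 1) then (1 : Int) else 0)).sum

-- ===== PRECONDITION & SPEC =====
def Spec_count_consecutive_numbers_py (numbers : List Int) (out : Int) : Prop := out = count_consecutive_numbers_py_alt numbers
instance (numbers : List Int) (out : Int) : Decidable (Spec_count_consecutive_numbers_py numbers out) := by unfold Spec_count_consecutive_numbers_py; infer_instance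

-- ===== CLAIM (what is proved, stated in full; the proofs are below) =====
def Claim_equal_count_consecutive_numbers_py : Prop := ∀ (numbers : List Int), Dom_count_consecutive_numbers_py numbers → Spec_count_consecutive_numbers_py numbers (count_consecutive_numbers_py numbers)

-- ===== LEMMAS AND PROOFS =====

def countAdj : List Int → Int
  | a :: b :: t => (if b - a = 1 then 1 else 0) + countAdj (b :: t)
  | _ => 0

theorem loopNat (l : List Int) (c : Int) :
    (List.range (l.length - 1)).foldl
      (fun acc k => if l.getD (k + 1) 0 - l.getD k 0 = 1 then acc + 1 else acc) c
    = c + countAdj l := by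
  induction l generalizing c with
  | nil => simp [countAdj]
  | cons a t ih =>
    cases t with
    | nil => simp [countAdj]
    | cons b t' =>
      have hlen : (a :: b :: t').length - 1 = t'.length + 1 := by simp
      rw [hlen, List.range_succ_eq_map, List.foldl_cons, List.foldl_map]
      have hf : (fun (x : Int) (y : Nat) =>
          if (a :: b :: t').getD (Nat.succ y + 1) 0 - (a :: b :: t').getD (Nat.succ y) 0 = 1 then x + 1 else x)
        = (fun (acc : Int) (k : Nat) => if (b :: t').getD (k + 1) 0 - (b :: t').getD k 0 = 1 then acc + 1 else acc) := by
        funext x y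
        simp
      rw [hf]
      have hl2 : t'.length = (b :: t').length - 1 := by simp
      rw [hl2, ih]
      simp only [List.getD_cons_succ, List.getD_cons_zero, countAdj]
      split_ifs <;> ring

theorem portA_eq_countAdj (numbers : List Int) :
    count_consecutive_numbers_py numbers = countAdj (PySem.List.sorted numbers (fun x => x) false) := by
  unfold count_consecutive_numbers_py
  set s := PySem.List.sorted numbers (fun x => x) false with hs
  show (PySem.List.pyRange 0 ((s.length : Int) - 1) 1).foldl
      (fun consecutive_count i =>
        if PySem.List.pyGetD s (i + 1) 0 - PySem.List.pyGetD s i 0 = 1 then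
          consecutive_count + 1
        else consecutive_count) 0 = countAdj s
  rw [PySem.List.pyRange_one, List.foldl_map]
  have htn : ((s.length : Int) - 1 - 0).toNat = s.length - 1 := by omega
  rw [htn]
  have hf : (fun (x : Int) (k : Nat) =>
      if PySem.List.pyGetD s (0 + (k : Int) + 1) 0 - PySem.List.pyGetD s (0 + (k : Int)) 0 = 1 then x + 1 else x)
    = (fun (acc : Int) (k : Nat) => if s.getD (k + 1) 0 - s.getD k 0 = 1 then acc + 1 else acc) := by
    funext x k
    have h1 : (0 + (k : Int) + 1) = ((k + 1 : Nat) : Int) := by push_cast; ring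
    have h2 : (0 + (k : Int)) = ((k : Nat) : Int) := by ring
    rw [h1, h2, PySem.List.pyGetD_natCast, PySem.List.pyGetD_natCast]
  rw [hf, loopNat]
  ring

theorem discard_of_not_mem (S : List Int) (x : Int) (hx : x ∉ S) : PySem.Set.discard S x = S := by
  unfold PySem.Set.discard
  rw [List.filter_eq_self]
  intro y hy
  have hne : y ≠ x := fun hh => hx (hh ▸ hy)
  simp [hne]

theorem perm_cons_discard (S : List Int) (x : Int) (hnd : S.Nodup) (hx : x ∈ S) :
    (x :: PySem.Set.discard S x).Perm S := by
  have h1 : PySem.Set.discard S x = S.erase x := by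
    rw [List.Nodup.erase_eq_filter hnd]
    rfl
  rw [h1]
  exact (List.perm_cons_erase hx).symm

theorem countAdj_sorted (l : List Int) (h : l.Pairwise (· ≤ ·)) :
    countAdj l = ((PySem.Set.ofList l).countP (fun v => decide ((v + 1) ∈ l)) : Int) := by
  induction l with
  | nil => simp [countAdj]
  | cons a t ih =>
    cases t with
    | nil =>
      simp [countAdj, PySem.Set.ofList_cons, PySem.Set.ofList_nil]
    | cons b t' =>
      have hab : a ≤ b := (List.pairwise_cons.mp h).1 b (by simp)
      have hat : ∀ x ∈ t', a ≤ x := fun x hx => (List.pairwise_cons.mp h).1 x (by simp [hx])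
      have htail : (b :: t').Pairwise (· ≤ ·) := (List.pairwise_cons.mp h).2
      have hbt : ∀ x ∈ t', b ≤ x := fun x hx => (List.pairwise_cons.mp htail).1 x hx
      have ihv := ih htail
      rw [PySem.Set.ofList_cons]
      by_cases heq : a = b
      · -- duplicate head: a contributes nothing new
        subst heq
        have hmem : a ∈ PySem.Set.ofList (a :: t') := by
          rw [PySem.Set.mem_ofList]; simp
        have hperm := perm_cons_discard _ _ (PySem.Set.nodup_ofList (a :: t')) hmem
        have hcnt := hperm.countP_eq (fun v => decide ((v + 1) ∈ a :: a :: t'))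
        rw [hcnt]
        have hcongr : (PySem.Set.ofList (a :: t')).countP (fun v => decide ((v + 1) ∈ a :: a :: t'))
            = (PySem.Set.ofList (a :: t')).countP (fun v => decide ((v + 1) ∈ a :: t')) := by
          apply List.countP_congr
          intro x hx
          simp [List.mem_cons]
        rw [hcongr, ← ihv]
        simp [countAdj]
      · -- a < b: a is a fresh minimum
        have hlt : a < b := lt_of_le_of_ne hab heq
        have hnot : a ∉ PySem.Set.ofList (b :: t') := by
          rw [PySem.Set.mem_ofList]
          simp only [List.mem_cons]
          rintro (h1 | h2)
          · omega
          · exact absurd (hbt a h2) (by omega)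
        rw [discard_of_not_mem _ _ hnot, List.countP_cons]
        have hpa : (decide ((a + 1) ∈ a :: b :: t') = true) ↔ b - a = 1 := by
          simp only [decide_eq_true_eq, List.mem_cons]
          constructor
          · rintro (h1 | h2 | h3)
            · omega
            · omega
            · have := hbt _ h3; omega
          · intro h1; exact Or.inr (Or.inl (by omega))
        have hcongr : (PySem.Set.ofList (b :: t')).countP (fun v => decide ((v + 1) ∈ a :: b :: t'))
            = (PySem.Set.ofList (b :: t')).countP (fun v => decide ((v + 1) ∈ b :: t')) := by
          apply List.countP_congr
          intro x hx
          rw [PySem.Set.mem_ofList] at hx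
          have hxb : b ≤ x := by
            rcases List.mem_cons.mp hx with h1 | h2
            · omega
            · exact hbt _ h2
          simp only [decide_eq_true_eq, List.mem_cons]
          constructor
          · rintro (h1 | h2 | h3)
            · omega
            · exact Or.inl h2
            · exact Or.inr h3
          · rintro (h1 | h2)
            · exact Or.inr (Or.inl h1)
            · exact Or.inr (Or.inr h2)
        rw [hcongr]
        simp only [countAdj]
        push_cast
        rw [← ihv]
        by_cases hb1 : b - a = 1
        · simp only [if_pos hb1]
          have hin : (a + 1) ∈ a :: b :: t' := by simp [show a + 1 = b by omega]
          simp [hin]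
          ring
        · simp only [if_neg hb1]
          have hout : (a + 1) ∉ a :: b :: t' := by
            simp only [List.mem_cons]
            rintro (h1 | h1 | h1)
            · omega
            · omega
            · have := hbt _ h1; omega
          simp [hout]

theorem final (numbers : List Int) :
    count_consecutive_numbers_py numbers = count_consecutive_numbers_py_alt numbers := by
  unfold count_consecutive_numbers_py_alt
  show count_consecutive_numbers_py numbers
    = ((PySem.Set.ofList numbers).map
        (fun v => if PySem.Set.contains (PySem.Set.ofList numbers) (v + 1) then (1 : Int) else 0)).sum
  rw [PySem.List.sum_map_ite_one_zero]
  have hpw : (PySem.List.sorted numbers (fun x => x) false).Pairwise (· ≤ ·) := by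
    simpa using PySem.List.sorted_pairwise numbers (fun x => x)
  rw [portA_eq_countAdj, countAdj_sorted _ hpw]
  congr 1
  have h1 : (PySem.Set.ofList (PySem.List.sorted numbers (fun x => x) false)).countP
        (fun v => decide ((v + 1) ∈ PySem.List.sorted numbers (fun x => x) false))
      = (PySem.Set.ofList (PySem.List.sorted numbers (fun x => x) false)).countP
        (fun v => decide ((v + 1) ∈ numbers)) := by
    apply List.countP_congr
    intro x _
    simp [PySem.List.mem_sorted]
  have hperm : (PySem.Set.ofList (PySem.List.sorted numbers (fun x => x) false)).Perm
      (PySem.Set.ofList numbers) := by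
    rw [List.perm_ext_iff_of_nodup (PySem.Set.nodup_ofList _) (PySem.Set.nodup_ofList _)]
    intro x
    simp [PySem.Set.mem_ofList, PySem.List.mem_sorted]
  rw [h1, hperm.countP_eq]
  apply List.countP_congr
  intro x _
  simp [PySem.Set.mem_ofList]

-- ===== VERDICT (by name: the statement is the Claim_ definition above) =====
theorem count_consecutive_numbers_py_spec : Claim_equal_count_consecutive_numbers_py := by
  intro numbers _
  unfold Spec_count_consecutive_numbers_py
  exact final numbers
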